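-- pv_equiv track=rewrite | github.com/AI-Image-Gen/generator-testing | scripts/parse_cfg.py | process_integer_value
-- ===== SOURCE A (Python) =====
-- def process_integer_value(lower_limit, upper_limit, value, dividable=1):
--     if not isinstance(value, int):
--         value = lower_limit
--     else:
--         if value < lower_limit:
--             value = lower_limit
--         elif value > upper_limit:
--             value = upper_limit
--     while value % dividable != 0:
--         value += 1
--     return value
-- ===== SOURCE B (Python) =====
-- def process_integer_value(lower_limit, upper_limit, value, dividable=1):
--     if value < lower_limit:
--         value = lower_limit
--     elif value > upper_limit:
--         value = upper_limit
--     return value + (-value) % abs(dividable)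
-- ===== Notes on version B (the rewrite author's own statement) =====
-- stated objective: faster
-- what changed: replaces the increment-until-divisible while loop with the closed-form round-up value + (-value) % abs(dividable)
import Mathlib
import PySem

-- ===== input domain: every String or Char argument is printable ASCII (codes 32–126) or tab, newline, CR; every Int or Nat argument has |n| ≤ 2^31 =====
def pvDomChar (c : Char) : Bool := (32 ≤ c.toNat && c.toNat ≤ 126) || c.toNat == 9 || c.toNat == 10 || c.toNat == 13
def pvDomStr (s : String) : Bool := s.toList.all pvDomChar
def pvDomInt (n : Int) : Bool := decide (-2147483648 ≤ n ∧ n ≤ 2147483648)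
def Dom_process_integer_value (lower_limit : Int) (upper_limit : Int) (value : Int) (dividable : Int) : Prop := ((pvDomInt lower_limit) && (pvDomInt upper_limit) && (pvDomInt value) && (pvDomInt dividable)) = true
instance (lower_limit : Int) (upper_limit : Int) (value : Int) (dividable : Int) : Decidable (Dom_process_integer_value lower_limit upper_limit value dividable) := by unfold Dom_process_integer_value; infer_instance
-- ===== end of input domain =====

-- B replaces A's increment-until-divisible while loop with the closed-form round-up
-- value + (-value) % abs(dividable)  (asymptotically faster: O(1) vs O(|dividable|)).

-- ===== PORT A =====
-- measure decrease for A's while loop (cited by the port's decreasing_by)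
theorem pivLoopA_measure (d v : Int) (hd : ¬ d = 0)
    (hm : ¬ PySem.Int.mod v d = 0) :
    (PySem.Int.mod (-(v + 1)) ((d.natAbs : Int))).toNat
      < (PySem.Int.mod (-v) ((d.natAbs : Int))).toNat := by
  set m : Int := (d.natAbs : Int) with hmdef
  have hmpos : 0 < m := by
    simp only [hmdef]
    exact_mod_cast Int.natAbs_pos.mpr hd
  have hdvd : ¬ m ∣ v := by
    intro h
    exact hm ((PySem.Int.mod_eq_zero_iff_dvd v d).mpr ((Int.natAbs_dvd).mp h))
  rw [PySem.Int.mod_eq_emod_of_pos hmpos, PySem.Int.mod_eq_emod_of_pos hmpos]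
  have h0 : 0 ≤ (-v) % m := Int.emod_nonneg _ (ne_of_gt hmpos)
  have h1 : (-v) % m < m := Int.emod_lt_of_pos _ hmpos
  have hne : (-v) % m ≠ 0 := by
    intro h
    exact hdvd (Int.dvd_neg.mp (Int.dvd_of_emod_eq_zero h))
  have key : (-(v + 1)) % m = (-v) % m - 1 := by
    have e1 : -(v + 1) = ((-v) % m - 1) + m * ((-v) / m) := by
      have := Int.ediv_add_emod (-v) m
      omega
    rw [e1, Int.add_mul_emod_self_left]
    exact Int.emod_eq_of_lt (by omega) (by omega)
  omega

-- A's while loop: value += 1 until value % dividable == 0 (the d = 0 guard marks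
-- where Python raises ZeroDivisionError, excluded by Pre_)
def pivLoopA (dividable : Int) (value : Int) : Int :=
  if _h : dividable = 0 then value
  else if _h2 : PySem.Int.mod value dividable = 0 then value
  else pivLoopA dividable (value + 1)
termination_by (PySem.Int.mod (-value) ((dividable.natAbs : Int))).toNat
decreasing_by exact pivLoopA_measure dividable value _h _h2

def process_integer_value (lower_limit : Int) (upper_limit : Int) (value : Int) (dividable : Int) : Int :=
  -- value is always an int here, so the isinstance branch never fires
  let value := if value < lower_limit then lower_limit
               else if value > upper_limit then upper_limit
               else value
  pivLoopA dividable value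

-- ===== PORT B =====
def process_integer_value_alt (lower_limit : Int) (upper_limit : Int) (value : Int) (dividable : Int) : Int :=
  let value := if value < lower_limit then lower_limit
               else if value > upper_limit then upper_limit
               else value
  value + PySem.Int.mod (-value) ((dividable.natAbs : Int))

-- ===== PRECONDITION & SPEC =====
-- Pre_ excludes exactly dividable = 0, where Python A raises ZeroDivisionError.
def Pre_process_integer_value (lower_limit : Int) (upper_limit : Int) (value : Int) (dividable : Int) : Prop := dividable ≠ 0
instance (lower_limit : Int) (upper_limit : Int) (value : Int) (dividable : Int) : Decidable (Pre_process_integer_value lower_limit upper_limit value dividable) := by unfold Pre_process_integer_value; infer_instance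

def pvWitness_process_integer_value : Int × Int × Int × Int := (0, 10, 4, 3)

def Spec_process_integer_value (lower_limit : Int) (upper_limit : Int) (value : Int) (dividable : Int) (out : Int) : Prop := out = process_integer_value_alt lower_limit upper_limit value dividable
instance (lower_limit : Int) (upper_limit : Int) (value : Int) (dividable : Int) (out : Int) : Decidable (Spec_process_integer_value lower_limit upper_limit value dividable out) := by unfold Spec_process_integer_value; infer_instance

-- ===== CLAIM (what is proved, stated in full; the proofs are below) =====
def Claim_equal_process_integer_value : Prop := ∀ (lower_limit : Int) (upper_limit : Int) (value : Int) (dividable : Int), Dom_process_integer_value lower_limit upper_limit value dividable → Pre_process_integer_value lower_limit upper_limit value dividable → Spec_process_integer_value lower_limit upper_limit value dividable (process_integer_value lower_limit upper_limit value dividable)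

-- ===== LEMMAS AND PROOFS =====
theorem pivLoopA_eq (d : Int) (hd : d ≠ 0) :
    ∀ n v, (PySem.Int.mod (-v) ((d.natAbs : Int))).toNat = n →
      pivLoopA d v = v + PySem.Int.mod (-v) ((d.natAbs : Int)) := by
  intro n
  induction n using Nat.strong_induction_on with
  | _ n ih =>
    intro v hn
    have hmpos : (0 : Int) < (d.natAbs : Int) := by
      exact_mod_cast Int.natAbs_pos.mpr hd
    rw [pivLoopA]
    by_cases h2 : PySem.Int.mod v d = 0
    · have hdvd : ((d.natAbs : Int)) ∣ v :=
        (Int.natAbs_dvd).mpr ((PySem.Int.mod_eq_zero_iff_dvd v d).mp h2)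
      have : PySem.Int.mod (-v) ((d.natAbs : Int)) = 0 :=
        (PySem.Int.mod_eq_zero_iff_dvd _ _).mpr (Dvd.dvd.neg_right hdvd)
      simp only [dif_neg hd, dif_pos h2, this, add_zero]
    · have hlt := pivLoopA_measure d v hd h2
      have hstep := ih _ (by omega) (v + 1) rfl
      have hkey : PySem.Int.mod (-(v + 1)) ((d.natAbs : Int))
          = PySem.Int.mod (-v) ((d.natAbs : Int)) - 1 := by
        rw [PySem.Int.mod_eq_emod_of_pos hmpos, PySem.Int.mod_eq_emod_of_pos hmpos]
        have hdvd : ¬ ((d.natAbs : Int)) ∣ v := by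
          intro h
          exact h2 ((PySem.Int.mod_eq_zero_iff_dvd v d).mpr ((Int.natAbs_dvd).mp h))
        have hne : (-v) % ((d.natAbs : Int)) ≠ 0 := by
          intro h
          exact hdvd (Int.dvd_neg.mp (Int.dvd_of_emod_eq_zero h))
        have h0 : 0 ≤ (-v) % ((d.natAbs : Int)) := Int.emod_nonneg _ (ne_of_gt hmpos)
        have h1 : (-v) % ((d.natAbs : Int)) < (d.natAbs : Int) := Int.emod_lt_of_pos _ hmpos
        have e1 : -(v + 1) = ((-v) % ((d.natAbs : Int)) - 1) + ((d.natAbs : Int)) * ((-v) / ((d.natAbs : Int))) := by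
          have := Int.ediv_add_emod (-v) ((d.natAbs : Int))
          omega
        rw [e1, Int.add_mul_emod_self_left]
        exact Int.emod_eq_of_lt (by omega) (by omega)
      rw [dif_neg hd, dif_neg h2]
      rw [hstep, hkey]
      ring

-- ===== VERDICT (by name: the statement is the Claim_ definition above) =====
theorem process_integer_value_spec : Claim_equal_process_integer_value := by
  intro lo hi v d _ hpre
  unfold Spec_process_integer_value process_integer_value process_integer_value_alt
  exact pivLoopA_eq d hpre _ _ rfl
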